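-- pv_equiv track=rewrite | github.com/gsabin86-ctrl/Cnc-tools | insert_kennametal_topswiss.py | get_cb
-- ===== SOURCE A (Python) =====
-- CB_INFO = {
--     "MPS":   ("TopSwiss Medium Positive Swiss - medium cutting on steel/stainless",
--               ["steel","stainless","cast iron"], ["medium","turning"], "S52PTK"),
--     "FPS":   ("TopSwiss Fine Positive Swiss - finishing on steel/stainless",
--               ["steel","stainless","cast iron","non-ferrous"], ["finishing","turning"], "S52PTK"),
--     "MWS":   ("TopSwiss Medium Wiper Swiss - wiper geometry for improved surface finish at higher feeds",
--               ["steel","stainless"], ["medium","turning"], "S52PTK"),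
--     "FWS":   ("TopSwiss Fine Wiper Swiss - wiper geometry for high surface quality finishing",
--               ["steel","stainless","cast iron"], ["finishing","turning"], "S52PTK"),
--     "MRPPS": ("TopSwiss PPS Right-Hand - precision positive for steel/stainless/titanium",
--               ["steel","stainless","titanium","superalloy"], ["finishing","turning"],
--               "S02PCK, S52MCK, S52SCK"),
--     "MLFS":  ("TopSwiss LFS - light finishing for stainless and superalloys",
--               ["stainless","titanium","superalloy","non-ferrous"], ["finishing","turning"],
--               "S02PCK, S52MCK, S52SCK"),
--     "MFFS":  ("TopSwiss FFS - fine finishing for stainless and superalloys",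
--               ["stainless","titanium","superalloy"], ["finishing","turning"],
--               "S52MCK, S52SCK"),
-- }
--
-- def get_cb(part, prefix):
--     suffix = part[len(prefix):]
--     for key in CB_INFO:
--         if suffix == key:
--             return key, CB_INFO[key]
--     for key in CB_INFO:
--         if suffix.endswith(key):
--             return key, CB_INFO[key]
--     return suffix, (suffix + " chipbreaker", ["steel"], ["turning"], "S52PTK")
-- ===== SOURCE B (Python) =====
-- CB_INFO = {
--     "MPS":   ("TopSwiss Medium Positive Swiss - medium cutting on steel/stainless",
--               ["steel","stainless","cast iron"], ["medium","turning"], "S52PTK"),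
--     "FPS":   ("TopSwiss Fine Positive Swiss - finishing on steel/stainless",
--               ["steel","stainless","cast iron","non-ferrous"], ["finishing","turning"], "S52PTK"),
--     "MWS":   ("TopSwiss Medium Wiper Swiss - wiper geometry for improved surface finish at higher feeds",
--               ["steel","stainless"], ["medium","turning"], "S52PTK"),
--     "FWS":   ("TopSwiss Fine Wiper Swiss - wiper geometry for high surface quality finishing",
--               ["steel","stainless","cast iron"], ["finishing","turning"], "S52PTK"),
--     "MRPPS": ("TopSwiss PPS Right-Hand - precision positive for steel/stainless/titanium",
--               ["steel","stainless","titanium","superalloy"], ["finishing","turning"],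
--               "S02PCK, S52MCK, S52SCK"),
--     "MLFS":  ("TopSwiss LFS - light finishing for stainless and superalloys",
--               ["stainless","titanium","superalloy","non-ferrous"], ["finishing","turning"],
--               "S02PCK, S52MCK, S52SCK"),
--     "MFFS":  ("TopSwiss FFS - fine finishing for stainless and superalloys",
--               ["stainless","titanium","superalloy"], ["finishing","turning"],
--               "S52MCK, S52SCK"),
-- }
--
-- def get_cb(part, prefix):
--     # No CB_INFO key is a suffix of another, so the matching key (if any) is
--     # simply the last 3, 4 or 5 characters of the part suffix: slice each
--     # candidate tail and look it up by hash instead of scanning the table.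
--     suffix = part[len(prefix):]
--     for L in (3, 4, 5):
--         tail = suffix[-L:]
--         if tail in CB_INFO:
--             return tail, CB_INFO[tail]
--     return suffix, (suffix + " chipbreaker", ["steel"], ["turning"], "S52PTK")
-- ===== Notes on version B (the rewrite author's own statement) =====
-- stated objective: alternative
-- what changed: Instead of A's two sequential scans of CB_INFO (exact match, then endswith), B slices the last 3, 4 and 5 characters of the part suffix and looks each tail up in the table by key; correct because no CB_INFO key is a suffix of another.
import Mathlib
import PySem

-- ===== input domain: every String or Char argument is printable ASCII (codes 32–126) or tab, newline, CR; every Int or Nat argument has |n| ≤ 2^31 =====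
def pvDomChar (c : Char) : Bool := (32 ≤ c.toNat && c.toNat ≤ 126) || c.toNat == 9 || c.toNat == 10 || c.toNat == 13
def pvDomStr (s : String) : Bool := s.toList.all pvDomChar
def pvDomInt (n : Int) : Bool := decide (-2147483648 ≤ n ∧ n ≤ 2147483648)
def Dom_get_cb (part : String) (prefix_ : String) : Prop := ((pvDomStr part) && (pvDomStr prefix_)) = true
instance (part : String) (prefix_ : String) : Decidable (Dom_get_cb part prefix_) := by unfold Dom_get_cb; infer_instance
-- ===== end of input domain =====

-- B replaces A's two scans of the table (exact match, then endswith) by slicing the last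
-- 3/4/5 characters of the suffix and looking each tail up in the table by key; correct
-- because no CB_INFO key is a suffix of another. Return value only, no mutation.

-- The CB_INFO table (module-level dict in insertion order, as an association list; shared constant).
def cbInfo : List (String × (String × List String × List String × String)) :=
  [ ("MPS",   ("TopSwiss Medium Positive Swiss - medium cutting on steel/stainless",
               ["steel","stainless","cast iron"], ["medium","turning"], "S52PTK")),
    ("FPS",   ("TopSwiss Fine Positive Swiss - finishing on steel/stainless",
               ["steel","stainless","cast iron","non-ferrous"], ["finishing","turning"], "S52PTK")),
    ("MWS",   ("TopSwiss Medium Wiper Swiss - wiper geometry for improved surface finish at higher feeds",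
               ["steel","stainless"], ["medium","turning"], "S52PTK")),
    ("FWS",   ("TopSwiss Fine Wiper Swiss - wiper geometry for high surface quality finishing",
               ["steel","stainless","cast iron"], ["finishing","turning"], "S52PTK")),
    ("MRPPS", ("TopSwiss PPS Right-Hand - precision positive for steel/stainless/titanium",
               ["steel","stainless","titanium","superalloy"], ["finishing","turning"],
               "S02PCK, S52MCK, S52SCK")),
    ("MLFS",  ("TopSwiss LFS - light finishing for stainless and superalloys",
               ["stainless","titanium","superalloy","non-ferrous"], ["finishing","turning"],
               "S02PCK, S52MCK, S52SCK")),
    ("MFFS",  ("TopSwiss FFS - fine finishing for stainless and superalloys",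
               ["stainless","titanium","superalloy"], ["finishing","turning"],
               "S52MCK, S52SCK")) ]

-- ===== PORT A =====
-- first loop of A: 'for key in CB_INFO: if suffix == key: return key, CB_INFO[key]'
def cbExactLoop (suffix : String) :
    List (String × (String × List String × List String × String)) →
    Option (String × (String × List String × List String × String))
  | [] => none
  | (k, v) :: rest => if suffix = k then some (k, v) else cbExactLoop suffix rest

-- second loop of A: 'for key in CB_INFO: if suffix.endswith(key): return key, CB_INFO[key]'
def cbEndsLoop (suffix : String) :
    List (String × (String × List String × List String × String)) →
    Option (String × (String × List String × List String × String))
  | [] => none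
  | (k, v) :: rest => if PySem.Str.endswith suffix k then some (k, v) else cbEndsLoop suffix rest

def get_cb (part : String) (prefix_ : String) :
    String × (String × List String × List String × String) :=
  let suffix := PySem.Str.slice part (some (PySem.Str.len prefix_)) none
  match cbExactLoop suffix cbInfo with
  | some r => r
  | none =>
    match cbEndsLoop suffix cbInfo with
    | some r => r
    | none => (suffix, (suffix ++ " chipbreaker", ["steel"], ["turning"], "S52PTK"))

-- ===== PORT B =====
-- CB_INFO viewed as a dict for B's 'tail in CB_INFO' / 'CB_INFO[tail]' lookups.
def cbDict : PySem.Dict String (String × List String × List String × String) :=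
  PySem.Dict.mk cbInfo

-- B's loop: 'for L in (3, 4, 5): tail = suffix[-L:]; if tail in CB_INFO: return tail, CB_INFO[tail]'
def cbTailSearch (suffix : String) :
    List Nat → String × (String × List String × List String × String)
  | [] => (suffix, (suffix ++ " chipbreaker", ["steel"], ["turning"], "S52PTK"))
  | L :: rest =>
    let tail := PySem.Str.slice suffix (some (-(L : Int))) none
    match PySem.Dict.get? cbDict tail with
    | some v => (tail, v)
    | none => cbTailSearch suffix rest

def get_cb_alt (part : String) (prefix_ : String) :
    String × (String × List String × List String × String) :=
  cbTailSearch (PySem.Str.slice part (some (PySem.Str.len prefix_)) none) [3, 4, 5]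

-- ===== PRECONDITION & SPEC =====
def Spec_get_cb (part : String) (prefix_ : String) (out : String × (String × List String × List String × String)) : Prop := out = get_cb_alt part prefix_
instance (part : String) (prefix_ : String) (out : String × (String × List String × List String × String)) : Decidable (Spec_get_cb part prefix_ out) := by unfold Spec_get_cb; infer_instance

-- ===== CLAIM =====
def Claim_equal_get_cb : Prop := ∀ (part : String) (prefix_ : String), Dom_get_cb part prefix_ → Spec_get_cb part prefix_ (get_cb part prefix_)

-- ===== LEMMAS AND PROOFS =====

theorem es_iff (s k : String) : PySem.Str.endswith s k = true ↔ k.toList <:+ s.toList := by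
  simp [PySem.Chars.endswith_iff]

theorem ne_of_not_es (s k : String) (h : ¬ PySem.Str.endswith s k = true) : s ≠ k := by
  intro he; subst he; exact h ((es_iff s s).mpr (List.suffix_refl _))

theorem tail_toList (s : String) (L : Nat) (h : 0 < L) :
    (PySem.Str.slice s (some (-(L : Int))) none).toList = s.toList.drop (s.toList.length - L) := by
  simp [PySem.List.slice_from_neg_natCast s.toList L h]

theorem hit_endswith (s k : String) (L : Nat) (h : 0 < L)
    (he : PySem.Str.slice s (some (-(L : Int))) none = k) : PySem.Str.endswith s k = true := by
  rw [es_iff, ← he, tail_toList s L h]; exact List.drop_suffix _ _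

theorem tail_ne (s k : String) (L : Nat) (h : 0 < L)
    (hb : ¬ PySem.Str.endswith s k = true) : PySem.Str.slice s (some (-(L : Int))) none ≠ k :=
  fun he => hb (hit_endswith s k L h he)

theorem tail_eq (s k : String) (L : Nat) (h : 0 < L) (hk : k.toList.length = L)
    (hb : PySem.Str.endswith s k = true) : PySem.Str.slice s (some (-(L : Int))) none = k := by
  apply String.toList_inj.mp
  rw [tail_toList s L h]
  have h2 := List.suffix_iff_eq_drop.mp ((es_iff s k).mp hb)
  rw [hk] at h2
  exact h2.symm

theorem tail_ne_len (s k : String) (L : Nat) (h : 0 < L)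
    (hlen : min s.toList.length L ≠ k.toList.length) :
    PySem.Str.slice s (some (-(L : Int))) none ≠ k := by
  intro he
  apply hlen
  rw [← he, tail_toList s L h, List.length_drop]
  omega

theorem not_both (s k1 k2 : String) (h12 : ¬ (k1.toList <:+ k2.toList))
    (h21 : ¬ (k2.toList <:+ k1.toList))
    (b1 : PySem.Str.endswith s k1 = true) (b2 : PySem.Str.endswith s k2 = true) : False := by
  rcases List.suffix_or_suffix_of_suffix ((es_iff s k1).mp b1) ((es_iff s k2).mp b2) with h | h
  · exact h12 h
  · exact h21 h

-- length of the full suffix string when s ends with k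
theorem len_ge_of_es (s k : String) (hb : PySem.Str.endswith s k = true) :
    k.toList.length ≤ s.toList.length :=
  ((es_iff s k).mp hb).length_le

-- Core fact: for any suffix string s, A's body equals B's body.
set_option maxHeartbeats 1600000 in
theorem core_eq (s : String) :
    (match cbExactLoop s cbInfo with
     | some r => r
     | none =>
       match cbEndsLoop s cbInfo with
       | some r => r
       | none => (s, (s ++ " chipbreaker", ["steel"], ["turning"], "S52PTK"))) =
    cbTailSearch s [3, 4, 5] := by
  by_cases b1 : PySem.Str.endswith s "MPS" = true
  · have n2 : ¬ PySem.Str.endswith s "FPS" = true := fun bx => (not_both s "MPS" "FPS" (by decide) (by decide) b1 bx).elim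
    have n3 : ¬ PySem.Str.endswith s "MWS" = true := fun bx => (not_both s "MPS" "MWS" (by decide) (by decide) b1 bx).elim
    have n4 : ¬ PySem.Str.endswith s "FWS" = true := fun bx => (not_both s "MPS" "FWS" (by decide) (by decide) b1 bx).elim
    have n5 : ¬ PySem.Str.endswith s "MRPPS" = true := fun bx => (not_both s "MPS" "MRPPS" (by decide) (by decide) b1 bx).elim
    have n6 : ¬ PySem.Str.endswith s "MLFS" = true := fun bx => (not_both s "MPS" "MLFS" (by decide) (by decide) b1 bx).elim
    have n7 : ¬ PySem.Str.endswith s "MFFS" = true := fun bx => (not_both s "MPS" "MFFS" (by decide) (by decide) b1 bx).elim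
    have t1 : PySem.Str.slice s (some (-(3 : Int))) none = "MPS" :=
      tail_eq s "MPS" 3 (by norm_num) (by decide) b1
    by_cases hs : s = "MPS"
    · subst hs; decide
    · have c1 := by simpa using b1
      have d2 := by simpa using n2
      have u2_3 : PySem.Str.slice s (some (-(3 : Int))) none ≠ "FPS" := tail_ne s "FPS" 3 (by norm_num) n2
      have d3 := by simpa using n3
      have u3_3 : PySem.Str.slice s (some (-(3 : Int))) none ≠ "MWS" := tail_ne s "MWS" 3 (by norm_num) n3
      have d4 := by simpa using n4
      have u4_3 : PySem.Str.slice s (some (-(3 : Int))) none ≠ "FWS" := tail_ne s "FWS" 3 (by norm_num) n4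
      have d5 := by simpa using n5
      have u5_3 : PySem.Str.slice s (some (-(3 : Int))) none ≠ "MRPPS" := tail_ne s "MRPPS" 3 (by norm_num) n5
      have d6 := by simpa using n6
      have u6_3 : PySem.Str.slice s (some (-(3 : Int))) none ≠ "MLFS" := tail_ne s "MLFS" 3 (by norm_num) n6
      have d7 := by simpa using n7
      have u7_3 : PySem.Str.slice s (some (-(3 : Int))) none ≠ "MFFS" := tail_ne s "MFFS" 3 (by norm_num) n7
      simp [cbExactLoop, cbEndsLoop, cbTailSearch, cbDict, cbInfo, PySem.Dict.get?_mk_cons, PySem.Dict.get?, hs, t1, c1, d2, ne_of_not_es s _ n2, u2_3, Ne.symm u2_3, d3, ne_of_not_es s _ n3, u3_3, Ne.symm u3_3, d4, ne_of_not_es s _ n4, u4_3, Ne.symm u4_3, d5, ne_of_not_es s _ n5, u5_3, Ne.symm u5_3, d6, ne_of_not_es s _ n6, u6_3, Ne.symm u6_3, d7, ne_of_not_es s _ n7, u7_3, Ne.symm u7_3]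
  by_cases b2 : PySem.Str.endswith s "FPS" = true
  · have n3 : ¬ PySem.Str.endswith s "MWS" = true := fun bx => (not_both s "FPS" "MWS" (by decide) (by decide) b2 bx).elim
    have n4 : ¬ PySem.Str.endswith s "FWS" = true := fun bx => (not_both s "FPS" "FWS" (by decide) (by decide) b2 bx).elim
    have n5 : ¬ PySem.Str.endswith s "MRPPS" = true := fun bx => (not_both s "FPS" "MRPPS" (by decide) (by decide) b2 bx).elim
    have n6 : ¬ PySem.Str.endswith s "MLFS" = true := fun bx => (not_both s "FPS" "MLFS" (by decide) (by decide) b2 bx).elim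
    have n7 : ¬ PySem.Str.endswith s "MFFS" = true := fun bx => (not_both s "FPS" "MFFS" (by decide) (by decide) b2 bx).elim
    have t2 : PySem.Str.slice s (some (-(3 : Int))) none = "FPS" :=
      tail_eq s "FPS" 3 (by norm_num) (by decide) b2
    by_cases hs : s = "FPS"
    · subst hs; decide
    · have c1 := by simpa using b2
      have d1 := by simpa using b1
      have u1_3 : PySem.Str.slice s (some (-(3 : Int))) none ≠ "MPS" := tail_ne s "MPS" 3 (by norm_num) b1
      have d3 := by simpa using n3
      have u3_3 : PySem.Str.slice s (some (-(3 : Int))) none ≠ "MWS" := tail_ne s "MWS" 3 (by norm_num) n3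
      have d4 := by simpa using n4
      have u4_3 : PySem.Str.slice s (some (-(3 : Int))) none ≠ "FWS" := tail_ne s "FWS" 3 (by norm_num) n4
      have d5 := by simpa using n5
      have u5_3 : PySem.Str.slice s (some (-(3 : Int))) none ≠ "MRPPS" := tail_ne s "MRPPS" 3 (by norm_num) n5
      have d6 := by simpa using n6
      have u6_3 : PySem.Str.slice s (some (-(3 : Int))) none ≠ "MLFS" := tail_ne s "MLFS" 3 (by norm_num) n6
      have d7 := by simpa using n7
      have u7_3 : PySem.Str.slice s (some (-(3 : Int))) none ≠ "MFFS" := tail_ne s "MFFS" 3 (by norm_num) n7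
      simp [cbExactLoop, cbEndsLoop, cbTailSearch, cbDict, cbInfo, PySem.Dict.get?_mk_cons, PySem.Dict.get?, hs, t2, c1, d1, ne_of_not_es s _ b1, u1_3, Ne.symm u1_3, d3, ne_of_not_es s _ n3, u3_3, Ne.symm u3_3, d4, ne_of_not_es s _ n4, u4_3, Ne.symm u4_3, d5, ne_of_not_es s _ n5, u5_3, Ne.symm u5_3, d6, ne_of_not_es s _ n6, u6_3, Ne.symm u6_3, d7, ne_of_not_es s _ n7, u7_3, Ne.symm u7_3]
  by_cases b3 : PySem.Str.endswith s "MWS" = true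
  · have n4 : ¬ PySem.Str.endswith s "FWS" = true := fun bx => (not_both s "MWS" "FWS" (by decide) (by decide) b3 bx).elim
    have n5 : ¬ PySem.Str.endswith s "MRPPS" = true := fun bx => (not_both s "MWS" "MRPPS" (by decide) (by decide) b3 bx).elim
    have n6 : ¬ PySem.Str.endswith s "MLFS" = true := fun bx => (not_both s "MWS" "MLFS" (by decide) (by decide) b3 bx).elim
    have n7 : ¬ PySem.Str.endswith s "MFFS" = true := fun bx => (not_both s "MWS" "MFFS" (by decide) (by decide) b3 bx).elim
    have t3 : PySem.Str.slice s (some (-(3 : Int))) none = "MWS" :=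
      tail_eq s "MWS" 3 (by norm_num) (by decide) b3
    by_cases hs : s = "MWS"
    · subst hs; decide
    · have c1 := by simpa using b3
      have d1 := by simpa using b1
      have u1_3 : PySem.Str.slice s (some (-(3 : Int))) none ≠ "MPS" := tail_ne s "MPS" 3 (by norm_num) b1
      have d2 := by simpa using b2
      have u2_3 : PySem.Str.slice s (some (-(3 : Int))) none ≠ "FPS" := tail_ne s "FPS" 3 (by norm_num) b2
      have d4 := by simpa using n4
      have u4_3 : PySem.Str.slice s (some (-(3 : Int))) none ≠ "FWS" := tail_ne s "FWS" 3 (by norm_num) n4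
      have d5 := by simpa using n5
      have u5_3 : PySem.Str.slice s (some (-(3 : Int))) none ≠ "MRPPS" := tail_ne s "MRPPS" 3 (by norm_num) n5
      have d6 := by simpa using n6
      have u6_3 : PySem.Str.slice s (some (-(3 : Int))) none ≠ "MLFS" := tail_ne s "MLFS" 3 (by norm_num) n6
      have d7 := by simpa using n7
      have u7_3 : PySem.Str.slice s (some (-(3 : Int))) none ≠ "MFFS" := tail_ne s "MFFS" 3 (by norm_num) n7
      simp [cbExactLoop, cbEndsLoop, cbTailSearch, cbDict, cbInfo, PySem.Dict.get?_mk_cons, PySem.Dict.get?, hs, t3, c1, d1, ne_of_not_es s _ b1, u1_3, Ne.symm u1_3, d2, ne_of_not_es s _ b2, u2_3, Ne.symm u2_3, d4, ne_of_not_es s _ n4, u4_3, Ne.symm u4_3, d5, ne_of_not_es s _ n5, u5_3, Ne.symm u5_3, d6, ne_of_not_es s _ n6, u6_3, Ne.symm u6_3, d7, ne_of_not_es s _ n7, u7_3, Ne.symm u7_3]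
  by_cases b4 : PySem.Str.endswith s "FWS" = true
  · have n5 : ¬ PySem.Str.endswith s "MRPPS" = true := fun bx => (not_both s "FWS" "MRPPS" (by decide) (by decide) b4 bx).elim
    have n6 : ¬ PySem.Str.endswith s "MLFS" = true := fun bx => (not_both s "FWS" "MLFS" (by decide) (by decide) b4 bx).elim
    have n7 : ¬ PySem.Str.endswith s "MFFS" = true := fun bx => (not_both s "FWS" "MFFS" (by decide) (by decide) b4 bx).elim
    have t4 : PySem.Str.slice s (some (-(3 : Int))) none = "FWS" :=
      tail_eq s "FWS" 3 (by norm_num) (by decide) b4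
    by_cases hs : s = "FWS"
    · subst hs; decide
    · have c1 := by simpa using b4
      have d1 := by simpa using b1
      have u1_3 : PySem.Str.slice s (some (-(3 : Int))) none ≠ "MPS" := tail_ne s "MPS" 3 (by norm_num) b1
      have d2 := by simpa using b2
      have u2_3 : PySem.Str.slice s (some (-(3 : Int))) none ≠ "FPS" := tail_ne s "FPS" 3 (by norm_num) b2
      have d3 := by simpa using b3
      have u3_3 : PySem.Str.slice s (some (-(3 : Int))) none ≠ "MWS" := tail_ne s "MWS" 3 (by norm_num) b3
      have d5 := by simpa using n5
      have u5_3 : PySem.Str.slice s (some (-(3 : Int))) none ≠ "MRPPS" := tail_ne s "MRPPS" 3 (by norm_num) n5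
      have d6 := by simpa using n6
      have u6_3 : PySem.Str.slice s (some (-(3 : Int))) none ≠ "MLFS" := tail_ne s "MLFS" 3 (by norm_num) n6
      have d7 := by simpa using n7
      have u7_3 : PySem.Str.slice s (some (-(3 : Int))) none ≠ "MFFS" := tail_ne s "MFFS" 3 (by norm_num) n7
      simp [cbExactLoop, cbEndsLoop, cbTailSearch, cbDict, cbInfo, PySem.Dict.get?_mk_cons, PySem.Dict.get?, hs, t4, c1, d1, ne_of_not_es s _ b1, u1_3, Ne.symm u1_3, d2, ne_of_not_es s _ b2, u2_3, Ne.symm u2_3, d3, ne_of_not_es s _ b3, u3_3, Ne.symm u3_3, d5, ne_of_not_es s _ n5, u5_3, Ne.symm u5_3, d6, ne_of_not_es s _ n6, u6_3, Ne.symm u6_3, d7, ne_of_not_es s _ n7, u7_3, Ne.symm u7_3]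
  by_cases b5 : PySem.Str.endswith s "MRPPS" = true
  · have n6 : ¬ PySem.Str.endswith s "MLFS" = true := fun bx => (not_both s "MRPPS" "MLFS" (by decide) (by decide) b5 bx).elim
    have n7 : ¬ PySem.Str.endswith s "MFFS" = true := fun bx => (not_both s "MRPPS" "MFFS" (by decide) (by decide) b5 bx).elim
    have t5 : PySem.Str.slice s (some (-(5 : Int))) none = "MRPPS" :=
      tail_eq s "MRPPS" 5 (by norm_num) (by decide) b5
    have hlen2 : 5 ≤ s.toList.length := by simpa using len_ge_of_es s "MRPPS" b5
    have tl3 : PySem.Str.slice s (some (-(3 : Int))) none ≠ "MRPPS" :=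
      tail_ne_len s "MRPPS" 3 (by norm_num) (by simp; omega)
    have tl4 : PySem.Str.slice s (some (-(4 : Int))) none ≠ "MRPPS" :=
      tail_ne_len s "MRPPS" 4 (by norm_num) (by simp; omega)
    by_cases hs : s = "MRPPS"
    · subst hs; decide
    · have c1 := by simpa using b5
      have d1 := by simpa using b1
      have u1_3 : PySem.Str.slice s (some (-(3 : Int))) none ≠ "MPS" := tail_ne s "MPS" 3 (by norm_num) b1
      have u1_4 : PySem.Str.slice s (some (-(4 : Int))) none ≠ "MPS" := tail_ne s "MPS" 4 (by norm_num) b1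
      have u1_5 : PySem.Str.slice s (some (-(5 : Int))) none ≠ "MPS" := tail_ne s "MPS" 5 (by norm_num) b1
      have d2 := by simpa using b2
      have u2_3 : PySem.Str.slice s (some (-(3 : Int))) none ≠ "FPS" := tail_ne s "FPS" 3 (by norm_num) b2
      have u2_4 : PySem.Str.slice s (some (-(4 : Int))) none ≠ "FPS" := tail_ne s "FPS" 4 (by norm_num) b2
      have u2_5 : PySem.Str.slice s (some (-(5 : Int))) none ≠ "FPS" := tail_ne s "FPS" 5 (by norm_num) b2
      have d3 := by simpa using b3
      have u3_3 : PySem.Str.slice s (some (-(3 : Int))) none ≠ "MWS" := tail_ne s "MWS" 3 (by norm_num) b3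
      have u3_4 : PySem.Str.slice s (some (-(4 : Int))) none ≠ "MWS" := tail_ne s "MWS" 4 (by norm_num) b3
      have u3_5 : PySem.Str.slice s (some (-(5 : Int))) none ≠ "MWS" := tail_ne s "MWS" 5 (by norm_num) b3
      have d4 := by simpa using b4
      have u4_3 : PySem.Str.slice s (some (-(3 : Int))) none ≠ "FWS" := tail_ne s "FWS" 3 (by norm_num) b4
      have u4_4 : PySem.Str.slice s (some (-(4 : Int))) none ≠ "FWS" := tail_ne s "FWS" 4 (by norm_num) b4
      have u4_5 : PySem.Str.slice s (some (-(5 : Int))) none ≠ "FWS" := tail_ne s "FWS" 5 (by norm_num) b4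
      have d6 := by simpa using n6
      have u6_3 : PySem.Str.slice s (some (-(3 : Int))) none ≠ "MLFS" := tail_ne s "MLFS" 3 (by norm_num) n6
      have u6_4 : PySem.Str.slice s (some (-(4 : Int))) none ≠ "MLFS" := tail_ne s "MLFS" 4 (by norm_num) n6
      have u6_5 : PySem.Str.slice s (some (-(5 : Int))) none ≠ "MLFS" := tail_ne s "MLFS" 5 (by norm_num) n6
      have d7 := by simpa using n7
      have u7_3 : PySem.Str.slice s (some (-(3 : Int))) none ≠ "MFFS" := tail_ne s "MFFS" 3 (by norm_num) n7
      have u7_4 : PySem.Str.slice s (some (-(4 : Int))) none ≠ "MFFS" := tail_ne s "MFFS" 4 (by norm_num) n7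
      have u7_5 : PySem.Str.slice s (some (-(5 : Int))) none ≠ "MFFS" := tail_ne s "MFFS" 5 (by norm_num) n7
      simp [cbExactLoop, cbEndsLoop, cbTailSearch, cbDict, cbInfo, PySem.Dict.get?_mk_cons, PySem.Dict.get?, hs, t5, c1, d1, ne_of_not_es s _ b1, u1_3, Ne.symm u1_3, u1_4, Ne.symm u1_4, u1_5, Ne.symm u1_5, d2, ne_of_not_es s _ b2, u2_3, Ne.symm u2_3, u2_4, Ne.symm u2_4, u2_5, Ne.symm u2_5, d3, ne_of_not_es s _ b3, u3_3, Ne.symm u3_3, u3_4, Ne.symm u3_4, u3_5, Ne.symm u3_5, d4, ne_of_not_es s _ b4, u4_3, Ne.symm u4_3, u4_4, Ne.symm u4_4, u4_5, Ne.symm u4_5, d6, ne_of_not_es s _ n6, u6_3, Ne.symm u6_3, u6_4, Ne.symm u6_4, u6_5, Ne.symm u6_5, d7, ne_of_not_es s _ n7, u7_3, Ne.symm u7_3, u7_4, Ne.symm u7_4, u7_5, Ne.symm u7_5, tl3, tl4, Ne.symm tl3, Ne.symm tl4]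
  by_cases b6 : PySem.Str.endswith s "MLFS" = true
  · have n7 : ¬ PySem.Str.endswith s "MFFS" = true := fun bx => (not_both s "MLFS" "MFFS" (by decide) (by decide) b6 bx).elim
    have t6 : PySem.Str.slice s (some (-(4 : Int))) none = "MLFS" :=
      tail_eq s "MLFS" 4 (by norm_num) (by decide) b6
    have hlen2 : 4 ≤ s.toList.length := by simpa using len_ge_of_es s "MLFS" b6
    have tl3 : PySem.Str.slice s (some (-(3 : Int))) none ≠ "MLFS" :=
      tail_ne_len s "MLFS" 3 (by norm_num) (by simp; omega)
    by_cases hs : s = "MLFS"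
    · subst hs; decide
    · have c1 := by simpa using b6
      have d1 := by simpa using b1
      have u1_3 : PySem.Str.slice s (some (-(3 : Int))) none ≠ "MPS" := tail_ne s "MPS" 3 (by norm_num) b1
      have u1_4 : PySem.Str.slice s (some (-(4 : Int))) none ≠ "MPS" := tail_ne s "MPS" 4 (by norm_num) b1
      have d2 := by simpa using b2
      have u2_3 : PySem.Str.slice s (some (-(3 : Int))) none ≠ "FPS" := tail_ne s "FPS" 3 (by norm_num) b2
      have u2_4 : PySem.Str.slice s (some (-(4 : Int))) none ≠ "FPS" := tail_ne s "FPS" 4 (by norm_num) b2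
      have d3 := by simpa using b3
      have u3_3 : PySem.Str.slice s (some (-(3 : Int))) none ≠ "MWS" := tail_ne s "MWS" 3 (by norm_num) b3
      have u3_4 : PySem.Str.slice s (some (-(4 : Int))) none ≠ "MWS" := tail_ne s "MWS" 4 (by norm_num) b3
      have d4 := by simpa using b4
      have u4_3 : PySem.Str.slice s (some (-(3 : Int))) none ≠ "FWS" := tail_ne s "FWS" 3 (by norm_num) b4
      have u4_4 : PySem.Str.slice s (some (-(4 : Int))) none ≠ "FWS" := tail_ne s "FWS" 4 (by norm_num) b4
      have d5 := by simpa using b5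
      have u5_3 : PySem.Str.slice s (some (-(3 : Int))) none ≠ "MRPPS" := tail_ne s "MRPPS" 3 (by norm_num) b5
      have u5_4 : PySem.Str.slice s (some (-(4 : Int))) none ≠ "MRPPS" := tail_ne s "MRPPS" 4 (by norm_num) b5
      have d7 := by simpa using n7
      have u7_3 : PySem.Str.slice s (some (-(3 : Int))) none ≠ "MFFS" := tail_ne s "MFFS" 3 (by norm_num) n7
      have u7_4 : PySem.Str.slice s (some (-(4 : Int))) none ≠ "MFFS" := tail_ne s "MFFS" 4 (by norm_num) n7
      simp [cbExactLoop, cbEndsLoop, cbTailSearch, cbDict, cbInfo, PySem.Dict.get?_mk_cons, PySem.Dict.get?, hs, t6, c1, d1, ne_of_not_es s _ b1, u1_3, Ne.symm u1_3, u1_4, Ne.symm u1_4, d2, ne_of_not_es s _ b2, u2_3, Ne.symm u2_3, u2_4, Ne.symm u2_4, d3, ne_of_not_es s _ b3, u3_3, Ne.symm u3_3, u3_4, Ne.symm u3_4, d4, ne_of_not_es s _ b4, u4_3, Ne.symm u4_3, u4_4, Ne.symm u4_4, d5, ne_of_not_es s _ b5, u5_3, Ne.symm u5_3, u5_4, Ne.symm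 u5_4, d7, ne_of_not_es s _ n7, u7_3, Ne.symm u7_3, u7_4, Ne.symm u7_4, tl3, Ne.symm tl3]
  by_cases b7 : PySem.Str.endswith s "MFFS" = true
  · have t7 : PySem.Str.slice s (some (-(4 : Int))) none = "MFFS" :=
      tail_eq s "MFFS" 4 (by norm_num) (by decide) b7
    have hlen2 : 4 ≤ s.toList.length := by simpa using len_ge_of_es s "MFFS" b7
    have tl3 : PySem.Str.slice s (some (-(3 : Int))) none ≠ "MFFS" :=
      tail_ne_len s "MFFS" 3 (by norm_num) (by simp; omega)
    by_cases hs : s = "MFFS"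
    · subst hs; decide
    · have c1 := by simpa using b7
      have d1 := by simpa using b1
      have u1_3 : PySem.Str.slice s (some (-(3 : Int))) none ≠ "MPS" := tail_ne s "MPS" 3 (by norm_num) b1
      have u1_4 : PySem.Str.slice s (some (-(4 : Int))) none ≠ "MPS" := tail_ne s "MPS" 4 (by norm_num) b1
      have d2 := by simpa using b2
      have u2_3 : PySem.Str.slice s (some (-(3 : Int))) none ≠ "FPS" := tail_ne s "FPS" 3 (by norm_num) b2
      have u2_4 : PySem.Str.slice s (some (-(4 : Int))) none ≠ "FPS" := tail_ne s "FPS" 4 (by norm_num) b2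
      have d3 := by simpa using b3
      have u3_3 : PySem.Str.slice s (some (-(3 : Int))) none ≠ "MWS" := tail_ne s "MWS" 3 (by norm_num) b3
      have u3_4 : PySem.Str.slice s (some (-(4 : Int))) none ≠ "MWS" := tail_ne s "MWS" 4 (by norm_num) b3
      have d4 := by simpa using b4
      have u4_3 : PySem.Str.slice s (some (-(3 : Int))) none ≠ "FWS" := tail_ne s "FWS" 3 (by norm_num) b4
      have u4_4 : PySem.Str.slice s (some (-(4 : Int))) none ≠ "FWS" := tail_ne s "FWS" 4 (by norm_num) b4
      have d5 := by simpa using b5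
      have u5_3 : PySem.Str.slice s (some (-(3 : Int))) none ≠ "MRPPS" := tail_ne s "MRPPS" 3 (by norm_num) b5
      have u5_4 : PySem.Str.slice s (some (-(4 : Int))) none ≠ "MRPPS" := tail_ne s "MRPPS" 4 (by norm_num) b5
      have d6 := by simpa using b6
      have u6_3 : PySem.Str.slice s (some (-(3 : Int))) none ≠ "MLFS" := tail_ne s "MLFS" 3 (by norm_num) b6
      have u6_4 : PySem.Str.slice s (some (-(4 : Int))) none ≠ "MLFS" := tail_ne s "MLFS" 4 (by norm_num) b6
      simp [cbExactLoop, cbEndsLoop, cbTailSearch, cbDict, cbInfo, PySem.Dict.get?_mk_cons, PySem.Dict.get?, hs, t7, c1, d1, ne_of_not_es s _ b1, u1_3, Ne.symm u1_3, u1_4, Ne.symm u1_4, d2, ne_of_not_es s _ b2, u2_3, Ne.symm u2_3, u2_4, Ne.symm u2_4, d3, ne_of_not_es s _ b3, u3_3, Ne.symm u3_3, u3_4, Ne.symm u3_4, d4, ne_of_not_es s _ b4, u4_3, Ne.symm u4_3, u4_4, Ne.symm u4_4, d5, ne_of_not_es s _ b5, u5_3, Ne.symm u5_3, u5_4, Ne.symm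 u5_4, d6, ne_of_not_es s _ b6, u6_3, Ne.symm u6_3, u6_4, Ne.symm u6_4, tl3, Ne.symm tl3]
  -- no key matches: both sides fall through to the fallback tuple
  have d1 := by simpa using b1
  have u1_3 : PySem.Str.slice s (some (-(3 : Int))) none ≠ "MPS" := tail_ne s "MPS" 3 (by norm_num) b1
  have u1_4 : PySem.Str.slice s (some (-(4 : Int))) none ≠ "MPS" := tail_ne s "MPS" 4 (by norm_num) b1
  have u1_5 : PySem.Str.slice s (some (-(5 : Int))) none ≠ "MPS" := tail_ne s "MPS" 5 (by norm_num) b1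
  have d2 := by simpa using b2
  have u2_3 : PySem.Str.slice s (some (-(3 : Int))) none ≠ "FPS" := tail_ne s "FPS" 3 (by norm_num) b2
  have u2_4 : PySem.Str.slice s (some (-(4 : Int))) none ≠ "FPS" := tail_ne s "FPS" 4 (by norm_num) b2
  have u2_5 : PySem.Str.slice s (some (-(5 : Int))) none ≠ "FPS" := tail_ne s "FPS" 5 (by norm_num) b2
  have d3 := by simpa using b3
  have u3_3 : PySem.Str.slice s (some (-(3 : Int))) none ≠ "MWS" := tail_ne s "MWS" 3 (by norm_num) b3
  have u3_4 : PySem.Str.slice s (some (-(4 : Int))) none ≠ "MWS" := tail_ne s "MWS" 4 (by norm_num) b3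
  have u3_5 : PySem.Str.slice s (some (-(5 : Int))) none ≠ "MWS" := tail_ne s "MWS" 5 (by norm_num) b3
  have d4 := by simpa using b4
  have u4_3 : PySem.Str.slice s (some (-(3 : Int))) none ≠ "FWS" := tail_ne s "FWS" 3 (by norm_num) b4
  have u4_4 : PySem.Str.slice s (some (-(4 : Int))) none ≠ "FWS" := tail_ne s "FWS" 4 (by norm_num) b4
  have u4_5 : PySem.Str.slice s (some (-(5 : Int))) none ≠ "FWS" := tail_ne s "FWS" 5 (by norm_num) b4
  have d5 := by simpa using b5
  have u5_3 : PySem.Str.slice s (some (-(3 : Int))) none ≠ "MRPPS" := tail_ne s "MRPPS" 3 (by norm_num) b5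
  have u5_4 : PySem.Str.slice s (some (-(4 : Int))) none ≠ "MRPPS" := tail_ne s "MRPPS" 4 (by norm_num) b5
  have u5_5 : PySem.Str.slice s (some (-(5 : Int))) none ≠ "MRPPS" := tail_ne s "MRPPS" 5 (by norm_num) b5
  have d6 := by simpa using b6
  have u6_3 : PySem.Str.slice s (some (-(3 : Int))) none ≠ "MLFS" := tail_ne s "MLFS" 3 (by norm_num) b6
  have u6_4 : PySem.Str.slice s (some (-(4 : Int))) none ≠ "MLFS" := tail_ne s "MLFS" 4 (by norm_num) b6
  have u6_5 : PySem.Str.slice s (some (-(5 : Int))) none ≠ "MLFS" := tail_ne s "MLFS" 5 (by norm_num) b6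
  have d7 := by simpa using b7
  have u7_3 : PySem.Str.slice s (some (-(3 : Int))) none ≠ "MFFS" := tail_ne s "MFFS" 3 (by norm_num) b7
  have u7_4 : PySem.Str.slice s (some (-(4 : Int))) none ≠ "MFFS" := tail_ne s "MFFS" 4 (by norm_num) b7
  have u7_5 : PySem.Str.slice s (some (-(5 : Int))) none ≠ "MFFS" := tail_ne s "MFFS" 5 (by norm_num) b7
  simp [cbExactLoop, cbEndsLoop, cbTailSearch, cbDict, cbInfo, PySem.Dict.get?_mk_cons, PySem.Dict.get?, d1, ne_of_not_es s _ b1, u1_3, Ne.symm u1_3, u1_4, Ne.symm u1_4, u1_5, Ne.symm u1_5, d2, ne_of_not_es s _ b2, u2_3, Ne.symm u2_3, u2_4, Ne.symm u2_4, u2_5, Ne.symm u2_5, d3, ne_of_not_es s _ b3, u3_3, Ne.symm u3_3, u3_4, Ne.symm u3_4, u3_5, Ne.symm u3_5, d4, ne_of_not_es s _ b4, u4_3, Ne.symm u4_3, u4_4, Ne.symm u4_4, u4_5, Ne.symm u4_5, d5, ne_of_not_es s _ b5, u5_3, Ne.symm u5_3, u5_4, Ne.symm u5_4, u5_5, Ne.symm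 u5_5, d6, ne_of_not_es s _ b6, u6_3, Ne.symm u6_3, u6_4, Ne.symm u6_4, u6_5, Ne.symm u6_5, d7, ne_of_not_es s _ b7, u7_3, Ne.symm u7_3, u7_4, Ne.symm u7_4, u7_5, Ne.symm u7_5]

-- ===== VERDICT =====
set_option maxHeartbeats 1600000 in
theorem get_cb_spec : Claim_equal_get_cb := by
  intro part prefix_ _
  show get_cb part prefix_ = get_cb_alt part prefix_
  unfold get_cb get_cb_alt
  exact core_eq _
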